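-- pv_equiv track=rewrite | github.com/laijingtao/model_comparison_ED_vs_Exner | HSR_upstream_feeding.py | slurm_id_to_values
-- ===== SOURCE A (Python) =====
-- def slurm_id_to_values(idx, a_array, b_array, c_array):
--     count = 0
--     for a in a_array:
--         for b in b_array:
--             for c in c_array:
--                 if count == idx:
--                     return a, b, c
--                 else:
--                     count += 1
--
--     return None, None, None
-- ===== SOURCE B (Python) =====
-- def slurm_id_to_values(idx, a_array, b_array, c_array):
--     lb, lc = len(b_array), len(c_array)
--     total = len(a_array) * lb * lc
--     if 0 <= idx < total:
--         q, ci = divmod(idx, lc)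
--         ai, bi = divmod(q, lb)
--         return a_array[ai], b_array[bi], c_array[ci]
--     return None, None, None
-- ===== Notes on version B (the rewrite author's own statement) =====
-- stated objective: alternative
-- what changed: Replaced the triple nested counting loop with a direct divmod decomposition of the flat index into the three array indices, guarded by a single bounds check.
import Mathlib
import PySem

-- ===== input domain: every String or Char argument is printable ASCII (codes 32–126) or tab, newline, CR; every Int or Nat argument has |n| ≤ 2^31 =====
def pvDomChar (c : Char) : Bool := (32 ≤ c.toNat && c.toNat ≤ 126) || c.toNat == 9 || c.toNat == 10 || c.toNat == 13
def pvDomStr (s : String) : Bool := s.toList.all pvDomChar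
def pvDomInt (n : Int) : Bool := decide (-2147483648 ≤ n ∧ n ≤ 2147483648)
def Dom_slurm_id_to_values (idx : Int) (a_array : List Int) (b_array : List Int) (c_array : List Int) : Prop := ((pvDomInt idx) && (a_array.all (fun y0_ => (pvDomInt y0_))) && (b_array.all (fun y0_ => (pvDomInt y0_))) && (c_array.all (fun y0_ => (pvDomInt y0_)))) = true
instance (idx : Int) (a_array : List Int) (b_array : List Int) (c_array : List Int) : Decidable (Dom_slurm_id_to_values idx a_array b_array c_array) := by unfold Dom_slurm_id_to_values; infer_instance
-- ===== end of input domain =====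

-- B computes the three indices by a direct divmod decomposition of the flat index with a bounds check, instead of A's triple nested counting loop.

-- ===== PORT A =====
-- innermost 'for c in c_array' loop; returns (early-return result, count after the loop)
def pvLoopC (idx a b : Int) (cs : List Int) (count : Int) :
    Option (List (Option Int)) × Int :=
  match cs with
  | [] => (none, count)
  | c :: rest =>
    if count = idx then (some [some a, some b, some c], count)
    else pvLoopC idx a b rest (count + 1)

-- middle 'for b in b_array' loop
def pvLoopB (idx a : Int) (bs cs : List Int) (count : Int) :
    Option (List (Option Int)) × Int :=
  match bs with
  | [] => (none, count)
  | b :: rest =>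
    match pvLoopC idx a b cs count with
    | (some r, k) => (some r, k)
    | (none, k) => pvLoopB idx a rest cs k

-- outer 'for a in a_array' loop
def pvLoopA (idx : Int) (as_ bs cs : List Int) (count : Int) :
    Option (List (Option Int)) × Int :=
  match as_ with
  | [] => (none, count)
  | a :: rest =>
    match pvLoopB idx a bs cs count with
    | (some r, k) => (some r, k)
    | (none, k) => pvLoopA idx rest bs cs k

def slurm_id_to_values (idx : Int) (a_array : List Int) (b_array : List Int) (c_array : List Int) : List (Option Int) :=
  match pvLoopA idx a_array b_array c_array 0 with
  | (some r, _) => r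
  | (none, _) => [none, none, none]

-- ===== PORT B =====
def slurm_id_to_values_alt (idx : Int) (a_array : List Int) (b_array : List Int) (c_array : List Int) : List (Option Int) :=
  let lb : Int := b_array.length
  let lc : Int := c_array.length
  let total : Int := (a_array.length : Int) * lb * lc
  if 0 ≤ idx ∧ idx < total then
    let q := PySem.Int.floordiv idx lc
    let ci := PySem.Int.mod idx lc
    let ai := PySem.Int.floordiv q lb
    let bi := PySem.Int.mod q lb
    [PySem.List.pyGet? a_array ai, PySem.List.pyGet? b_array bi, PySem.List.pyGet? c_array ci]
  else [none, none, none]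

-- ===== PRECONDITION & SPEC =====
def Spec_slurm_id_to_values (idx : Int) (a_array : List Int) (b_array : List Int) (c_array : List Int) (out : List (Option Int)) : Prop := out = slurm_id_to_values_alt idx a_array b_array c_array
instance (idx : Int) (a_array : List Int) (b_array : List Int) (c_array : List Int) (out : List (Option Int)) : Decidable (Spec_slurm_id_to_values idx a_array b_array c_array out) := by unfold Spec_slurm_id_to_values; infer_instance

-- ===== CLAIM (what is proved, stated in full; the proofs are below) =====
def Claim_equal_slurm_id_to_values : Prop := ∀ (idx : Int) (a_array : List Int) (b_array : List Int) (c_array : List Int), Dom_slurm_id_to_values idx a_array b_array c_array → Spec_slurm_id_to_values idx a_array b_array c_array (slurm_id_to_values idx a_array b_array c_array)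

-- ===== LEMMAS AND PROOFS =====

theorem pvLoopC_lt (idx a b : Int) (cs : List Int) (count : Int) (h : idx < count) :
    pvLoopC idx a b cs count = (none, count + cs.length) := by
  induction cs generalizing count with
  | nil => simp [pvLoopC]
  | cons c rest ih =>
    rw [pvLoopC]
    rw [if_neg (by omega)]
    rw [ih (count + 1) (by omega)]
    simp; omega

theorem pvLoopC_ge (idx a b : Int) (cs : List Int) (count : Int)
    (h : count + (cs.length : Int) ≤ idx) :
    pvLoopC idx a b cs count = (none, count + cs.length) := by
  induction cs generalizing count with
  | nil => simp [pvLoopC]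
  | cons c rest ih =>
    rw [pvLoopC]
    rw [if_neg (by simp at h; omega)]
    rw [ih (count + 1) (by simp at h ⊢; omega)]
    simp; omega

theorem pvLoopC_hit (idx a b : Int) (cs : List Int) (count : Int)
    (h1 : count ≤ idx) (h2 : idx < count + (cs.length : Int)) :
    ∃ k, pvLoopC idx a b cs count =
      (some [some a, some b, cs[(idx - count).toNat]?], k) := by
  induction cs generalizing count with
  | nil => simp at h2; omega
  | cons c rest ih =>
    rw [pvLoopC]
    by_cases hc : count = idx
    · rw [if_pos hc]
      refine ⟨count, ?_⟩
      have : (idx - count).toNat = 0 := by omega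
      simp [hc]
    · rw [if_neg hc]
      obtain ⟨k, hk⟩ := ih (count + 1) (by omega) (by simp at h2 ⊢; omega)
      refine ⟨k, ?_⟩
      rw [hk]
      have : (idx - count).toNat = (idx - (count + 1)).toNat + 1 := by omega
      simp [this]

theorem pvLoopB_lt (idx a : Int) (bs cs : List Int) (count : Int) (h : idx < count) :
    pvLoopB idx a bs cs count = (none, count + (bs.length * cs.length : Nat)) := by
  induction bs generalizing count with
  | nil => simp [pvLoopB]
  | cons b rest ih =>
    rw [pvLoopB, pvLoopC_lt idx a b cs count h]
    dsimp only
    rw [ih (count + cs.length) (by omega)]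
    simp; ring

theorem pvLoopB_ge (idx a : Int) (bs cs : List Int) (count : Int)
    (h : count + ((bs.length * cs.length : Nat) : Int) ≤ idx) :
    pvLoopB idx a bs cs count = (none, count + (bs.length * cs.length : Nat)) := by
  induction bs generalizing count with
  | nil => simp [pvLoopB]
  | cons b rest ih =>
    have hc : count + (cs.length : Int) ≤ idx := by
      simp only [List.length_cons] at h; push_cast at h; nlinarith [Nat.cast_nonneg (α := Int) (rest.length * cs.length),
        Nat.cast_nonneg (α := Int) rest.length, Nat.cast_nonneg (α := Int) cs.length]
    rw [pvLoopB, pvLoopC_ge idx a b cs count hc]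
    dsimp only
    rw [ih (count + cs.length) (by simp only [List.length_cons] at h; push_cast at h ⊢; nlinarith)]
    simp; ring

theorem pvLoopB_hit (idx a : Int) (bs cs : List Int) (count : Int)
    (h1 : count ≤ idx) (h2 : idx < count + ((bs.length * cs.length : Nat) : Int)) :
    ∃ k, pvLoopB idx a bs cs count =
      (some [some a, bs[(idx - count).toNat / cs.length]?,
             cs[(idx - count).toNat % cs.length]?], k) := by
  induction bs generalizing count with
  | nil => simp at h2; omega
  | cons b rest ih =>
    have hcl : 0 < cs.length := by
      rcases Nat.eq_zero_or_pos cs.length with h0 | h0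
      · simp [h0] at h2; omega
      · exact h0
    rw [pvLoopB]
    by_cases hin : idx < count + (cs.length : Int)
    · obtain ⟨k, hk⟩ := pvLoopC_hit idx a b cs count h1 hin
      rw [hk]
      refine ⟨k, ?_⟩
      have hm : (idx - count).toNat < cs.length := by omega
      rw [Nat.div_eq_of_lt hm, Nat.mod_eq_of_lt hm]
      simp
    · push_neg at hin
      rw [pvLoopC_ge idx a b cs count hin]
      dsimp only
      obtain ⟨k, hk⟩ := ih (count + cs.length) (by omega)
        (by simp only [List.length_cons] at h2; push_cast at h2 ⊢; nlinarith)
      rw [hk]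
      refine ⟨k, ?_⟩
      have hM : (idx - count).toNat = (idx - (count + (cs.length : Int))).toNat + cs.length := by
        omega
      have hdiv : (idx - count).toNat / cs.length
          = (idx - (count + (cs.length : Int))).toNat / cs.length + 1 := by
        rw [hM, Nat.add_div_right _ hcl]
      have hmod : (idx - count).toNat % cs.length
          = (idx - (count + (cs.length : Int))).toNat % cs.length := by
        rw [hM, Nat.add_mod_right]
      rw [hdiv, hmod]
      simp

theorem pvLoopA_lt (idx : Int) (as_ bs cs : List Int) (count : Int) (h : idx < count) :
    pvLoopA idx as_ bs cs count = (none, count + (as_.length * (bs.length * cs.length) : Nat)) := by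
  induction as_ generalizing count with
  | nil => simp [pvLoopA]
  | cons a rest ih =>
    rw [pvLoopA, pvLoopB_lt idx a bs cs count h]
    dsimp only
    rw [ih (count + (bs.length * cs.length : Nat)) (by omega)]
    simp; ring

theorem pvLoopA_ge (idx : Int) (as_ bs cs : List Int) (count : Int)
    (h : count + ((as_.length * (bs.length * cs.length) : Nat) : Int) ≤ idx) :
    pvLoopA idx as_ bs cs count = (none, count + (as_.length * (bs.length * cs.length) : Nat)) := by
  induction as_ generalizing count with
  | nil => simp [pvLoopA]
  | cons a rest ih =>
    have hb : count + ((bs.length * cs.length : Nat) : Int) ≤ idx := by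
      simp only [List.length_cons] at h; push_cast at h ⊢
      nlinarith [mul_nonneg (mul_nonneg (Nat.cast_nonneg (α := Int) rest.length)
        (Nat.cast_nonneg (α := Int) bs.length)) (Nat.cast_nonneg (α := Int) cs.length)]
    rw [pvLoopA, pvLoopB_ge idx a bs cs count hb]
    dsimp only
    rw [ih (count + (bs.length * cs.length : Nat)) (by simp only [List.length_cons] at h; push_cast at h ⊢; nlinarith)]
    simp; ring

theorem pvLoopA_hit (idx : Int) (as_ bs cs : List Int) (count : Int)
    (h1 : count ≤ idx) (h2 : idx < count + ((as_.length * (bs.length * cs.length) : Nat) : Int)) :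
    ∃ k, pvLoopA idx as_ bs cs count =
      (some [as_[(idx - count).toNat / (bs.length * cs.length)]?,
             bs[((idx - count).toNat % (bs.length * cs.length)) / cs.length]?,
             cs[((idx - count).toNat % (bs.length * cs.length)) % cs.length]?], k) := by
  induction as_ generalizing count with
  | nil => simp at h2; omega
  | cons a rest ih =>
    have hbc : 0 < bs.length * cs.length := by
      rcases Nat.eq_zero_or_pos (bs.length * cs.length) with h0 | h0
      · simp [h0] at h2; omega
      · exact h0
    rw [pvLoopA]
    by_cases hin : idx < count + ((bs.length * cs.length : Nat) : Int)
    · obtain ⟨k, hk⟩ := pvLoopB_hit idx a bs cs count h1 hin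
      rw [hk]
      refine ⟨k, ?_⟩
      have hm : (idx - count).toNat < bs.length * cs.length := by omega
      rw [Nat.div_eq_of_lt hm, Nat.mod_eq_of_lt hm]
      simp
    · push_neg at hin
      rw [pvLoopB_ge idx a bs cs count hin]
      dsimp only
      obtain ⟨k, hk⟩ := ih (count + (bs.length * cs.length : Nat)) (by omega)
        (by simp only [List.length_cons] at h2; push_cast at h2 ⊢; nlinarith)
      rw [hk]
      refine ⟨k, ?_⟩
      have hM : (idx - count).toNat
          = (idx - (count + ((bs.length * cs.length : Nat) : Int))).toNat + bs.length * cs.length := by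
        omega
      have hdiv : (idx - count).toNat / (bs.length * cs.length)
          = (idx - (count + ((bs.length * cs.length : Nat) : Int))).toNat / (bs.length * cs.length) + 1 := by
        rw [hM, Nat.add_div_right _ hbc]
      have hmod : (idx - count).toNat % (bs.length * cs.length)
          = (idx - (count + ((bs.length * cs.length : Nat) : Int))).toNat % (bs.length * cs.length) := by
        rw [hM, Nat.add_mod_right]
      rw [hdiv, hmod]
      simp

-- ===== VERDICT (by name: the statement is the Claim_ definition above) =====
theorem slurm_id_to_values_spec : Claim_equal_slurm_id_to_values := by
  intro idx as_ bs cs _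
  unfold Spec_slurm_id_to_values slurm_id_to_values slurm_id_to_values_alt
  simp only
  by_cases h : 0 ≤ idx ∧ idx < (as_.length : Int) * bs.length * cs.length
  · rw [if_pos h]
    obtain ⟨h1, h2⟩ := h
    have h2' : idx < 0 + ((as_.length * (bs.length * cs.length) : Nat) : Int) := by
      push_cast; linarith [h2, mul_assoc (as_.length : Int) (bs.length : Int) (cs.length : Int)]
    obtain ⟨k, hk⟩ := pvLoopA_hit idx as_ bs cs 0 h1 h2'
    have e0 : (idx - 0).toNat = idx.toNat := by omega
    have hn : idx = ((idx.toNat : Nat) : Int) := by omega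
    rw [hk]
    dsimp only
    rw [e0]
    conv_rhs => rw [hn]
    rw [PySem.Int.floordiv_natCast, PySem.Int.mod_natCast,
        PySem.Int.floordiv_natCast, PySem.Int.mod_natCast]
    rw [PySem.List.pyGet?_natCast, PySem.List.pyGet?_natCast, PySem.List.pyGet?_natCast]
    congr 1
    · -- a index: n / (bl*cl) = n / cl / bl
      rw [Nat.div_div_eq_div_mul, Nat.mul_comm cs.length bs.length]
    congr 1
    · -- b index: n % (bl*cl) / cl = n / cl % bl
      rw [Nat.mul_comm bs.length cs.length, Nat.mod_mul_right_div_self]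
    congr 1
    -- c index: n % (bl*cl) % cl = n % cl
    rw [Nat.mod_mod_of_dvd _ (dvd_mul_left cs.length bs.length)]
  · rw [if_neg h]
    push_neg at h
    by_cases hneg : idx < 0
    · rw [pvLoopA_lt idx as_ bs cs 0 hneg]
    · push_neg at hneg
      have := h hneg
      have hge : (0 : Int) + ((as_.length * (bs.length * cs.length) : Nat) : Int) ≤ idx := by
        push_cast
        linarith [this, mul_assoc (as_.length : Int) (bs.length : Int) (cs.length : Int)]
      rw [pvLoopA_ge idx as_ bs cs 0 hge]
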